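-- pv_equiv track=rewrite | github.com/Adronz/Genome_assembler | generate_spec_to_seq.py | recover_read_numbers
-- ===== SOURCE A (Python) =====
-- def recover_read_numbers(text:str, spectrum_dict:dict):
--     read_order_list = list()
--     for i in range(len(text)):
--         for key, value in spectrum_dict.items():
--             if text[i:i+len(value)//5] == value[0:len(value)//5]:
--                 format = f'>{key}'
--                 format = format.split('/')[0]
--                 read_order_list.append(format)
--     return read_order_list
-- ===== SOURCE B (Python) =====
-- def recover_read_numbers(text: str, spectrum_dict: dict):
--     # Build a hash index over DISTINCT value-prefixes: each group maps a prefix to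
--     # the (dict index, formatted name) pairs that share it, so a prefix shared by
--     # several reads is compared against the text only once per position; the
--     # per-position candidates are then sorted by dict index to restore A's order.
--     groups = {}
--     for idx, (key, value) in enumerate(spectrum_dict.items()):
--         pre = value[:len(value) // 5]
--         fmt = ('>' + key).split('/')[0]
--         groups.setdefault(pre, []).append((idx, fmt))
--     out = []
--     for i in range(len(text)):
--         cand = []
--         for pre, entries in groups.items():
--             if text.startswith(pre, i):
--                 cand.extend(entries)
--         cand.sort(key=lambda e: e[0])
--         out.extend(fmt for _, fmt in cand)
--     return out
-- ===== Notes on version B (the rewrite author's own statement) =====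
-- stated objective: faster
-- what changed: B replaces A's per-(position,key) re-slicing/re-formatting with a hash index grouping the dictionary entries by their distinct value-prefixes (prefix and formatted name computed once per entry, a shared prefix compared against the text once per position instead of once per entry), and restores A's position-major dict-order output by sorting each position's candidates by dict index.
import Mathlib
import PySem

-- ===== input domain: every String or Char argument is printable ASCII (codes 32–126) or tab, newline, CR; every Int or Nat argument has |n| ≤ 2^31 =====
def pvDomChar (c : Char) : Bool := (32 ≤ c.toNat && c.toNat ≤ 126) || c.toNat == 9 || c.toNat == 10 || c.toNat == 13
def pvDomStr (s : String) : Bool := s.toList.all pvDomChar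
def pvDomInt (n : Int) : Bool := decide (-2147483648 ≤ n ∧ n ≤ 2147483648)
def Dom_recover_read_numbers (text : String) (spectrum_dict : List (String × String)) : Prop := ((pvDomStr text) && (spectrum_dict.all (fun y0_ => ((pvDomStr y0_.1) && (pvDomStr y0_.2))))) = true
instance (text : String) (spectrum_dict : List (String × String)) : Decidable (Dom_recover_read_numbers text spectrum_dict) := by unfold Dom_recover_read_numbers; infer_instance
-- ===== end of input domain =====

-- B groups the dictionary entries by their distinct value-prefixes in a hash index (prefix and
-- formatted name computed once per entry; a shared prefix is compared against the text once per
-- position), then sorts each position's candidates by dict index to restore A's output order.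

-- ===== PORT A =====
-- shared by both sources:  f'>{key}'.split('/')[0]  (resp. ('>' + key).split('/')[0]) —
-- split('/') is exact via Chars.split? (separator nonempty, so `some`), and its result is
-- nonempty, so the Python index [0] (ported as pyGetD _ 0 []) never raises.
def pvFmt (key : String) : String :=
  String.ofList (PySem.List.pyGetD ((PySem.Chars.split? ('>' :: key.toList) ['/']).getD []) 0 [])

def recover_read_numbers (text : String) (spectrum_dict : List (String × String)) : List String :=
  (PySem.List.pyRange 0 (PySem.Str.len text) 1).foldl (fun read_order_list i =>
    spectrum_dict.foldl (fun read_order_list kv =>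
      if PySem.Str.slice text (some i) (some (i + PySem.Int.floordiv (PySem.Str.len kv.2) 5))
         = PySem.Str.slice kv.2 (some 0) (some (PySem.Int.floordiv (PySem.Str.len kv.2) 5))
      then read_order_list ++ [pvFmt kv.1]
      else read_order_list) read_order_list) []

-- ===== PORT B =====
-- value[:len(value)//5], the prefix used as the grouping key
def pvPre (v : String) : String :=
  PySem.Str.slice v none (some (PySem.Int.floordiv (PySem.Str.len v) 5))

def recover_read_numbers_alt (text : String) (spectrum_dict : List (String × String)) : List String :=
  let groups : PySem.Dict String (List (Int × String)) :=
    (PySem.List.enumerate spectrum_dict).foldl (fun d e =>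
      d.modify (pvPre e.2.2) [] (fun g => g ++ [(e.1, pvFmt e.2.1)])) PySem.Dict.empty
  (PySem.List.pyRange 0 (PySem.Str.len text) 1).foldl (fun out i =>
    let cand := groups.items.foldl (fun c pe =>
      -- text.startswith(pre, i): exact as startswith on text[i:] since 0 ≤ i here
      if PySem.Str.startswith (PySem.Str.slice text (some i) none) pe.1
      then c ++ pe.2 else c) []
    out ++ (PySem.List.sorted cand (fun e => e.1)).map (fun e => e.2)) []

-- ===== PRECONDITION & SPEC =====
-- Pre_ excludes association lists with duplicate keys: they have no faithful Python-dict
-- counterpart (dict construction collapses duplicates, keeping the last value), so A's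
-- behaviour on them is not defined by the encoding.
def Pre_recover_read_numbers (text : String) (spectrum_dict : List (String × String)) : Prop :=
  (spectrum_dict.map Prod.fst).Nodup

instance (text : String) (spectrum_dict : List (String × String)) : Decidable (Pre_recover_read_numbers text spectrum_dict) := by unfold Pre_recover_read_numbers; infer_instance

def pvWitness_recover_read_numbers : String × (List (String × String)) :=
  ("abcab", [("r1/x", "abcabc"), ("r2", "bca")])

def Spec_recover_read_numbers (text : String) (spectrum_dict : List (String × String)) (out : List String) : Prop := out = recover_read_numbers_alt text spectrum_dict
instance (text : String) (spectrum_dict : List (String × String)) (out : List String) : Decidable (Spec_recover_read_numbers text spectrum_dict out) := by unfold Spec_recover_read_numbers; infer_instance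

-- ===== CLAIM (what is proved, stated in full; the proofs are below) =====
def Claim_equal_recover_read_numbers : Prop := ∀ (text : String) (spectrum_dict : List (String × String)), Dom_recover_read_numbers text spectrum_dict → Pre_recover_read_numbers text spectrum_dict → Spec_recover_read_numbers text spectrum_dict (recover_read_numbers text spectrum_dict)

-- ===== LEMMAS AND PROOFS =====

-- B's match test at position i for entry kv, as a Bool predicate.
def pvCondB (text : String) (kv : String × String) (i : Int) : Bool :=
  PySem.Str.startswith (PySem.Str.slice text (some i) none) (pvPre kv.2)

-- the grouping-key/value list B's dict is built from
def pvL (spectrum_dict : List (String × String)) : List (String × (Int × String)) :=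
  (PySem.List.enumerate spectrum_dict).map (fun e => (pvPre e.2.2, (e.1, pvFmt e.2.1)))

-- A's normal form: position-major flatMap of a filtered map over the dictionary.
lemma pvA_eq (text : String) (ds : List (String × String)) :
    recover_read_numbers text ds =
      (PySem.List.pyRange 0 (PySem.Str.len text) 1).flatMap (fun i =>
        (ds.filter (fun kv =>
          decide (PySem.Str.slice text (some i) (some (i + PySem.Int.floordiv (PySem.Str.len kv.2) 5))
            = PySem.Str.slice kv.2 (some 0) (some (PySem.Int.floordiv (PySem.Str.len kv.2) 5))))).map
          (fun kv => pvFmt kv.1)) := by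
  unfold recover_read_numbers
  have hin : ∀ (acc : List String) (i : Int),
      ds.foldl (fun acc kv =>
        if PySem.Str.slice text (some i) (some (i + PySem.Int.floordiv (PySem.Str.len kv.2) 5))
           = PySem.Str.slice kv.2 (some 0) (some (PySem.Int.floordiv (PySem.Str.len kv.2) 5))
        then acc ++ [pvFmt kv.1] else acc) acc
      = acc ++ (ds.filter (fun kv =>
          decide (PySem.Str.slice text (some i) (some (i + PySem.Int.floordiv (PySem.Str.len kv.2) 5))
            = PySem.Str.slice kv.2 (some 0) (some (PySem.Int.floordiv (PySem.Str.len kv.2) 5))))).map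
          (fun kv => pvFmt kv.1) := by
    intro acc i
    rw [← PySem.List.foldl_append_if]
    apply PySem.List.foldl_congr_mem
    intro a kv _
    by_cases h : PySem.Str.slice text (some i) (some (i + PySem.Int.floordiv (PySem.Str.len kv.2) 5))
        = PySem.Str.slice kv.2 (some 0) (some (PySem.Int.floordiv (PySem.Str.len kv.2) 5)) <;>
      simp [h]
  rw [PySem.List.foldl_congr_mem _ _
      (fun acc i => acc ++ (ds.filter (fun kv =>
          decide (PySem.Str.slice text (some i) (some (i + PySem.Int.floordiv (PySem.Str.len kv.2) 5))
            = PySem.Str.slice kv.2 (some 0) (some (PySem.Int.floordiv (PySem.Str.len kv.2) 5))))).map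
          (fun kv => pvFmt kv.1)) _ (by intro acc i _; exact hin acc i)]
  rw [PySem.List.foldl_append_eq_flatMap]
  simp

-- the two match tests agree at every nonnegative position
lemma pvCond_agree (text : String) (kv : String × String) (i : Int) (h0 : 0 ≤ i) :
    decide (PySem.Str.slice text (some i) (some (i + PySem.Int.floordiv (PySem.Str.len kv.2) 5))
      = PySem.Str.slice kv.2 (some 0) (some (PySem.Int.floordiv (PySem.Str.len kv.2) 5)))
    = pvCondB text kv i := by
  have hL : PySem.Int.floordiv (PySem.Str.len kv.2) 5 = ((kv.2.toList.length / 5 : Nat) : Int) := by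
    rw [PySem.Str.len_eq]; exact_mod_cast PySem.Int.floordiv_natCast _ 5
  obtain ⟨k, rfl⟩ := Int.eq_ofNat_of_zero_le h0
  set m : Nat := kv.2.toList.length / 5 with hm
  have hmle : m ≤ kv.2.toList.length := Nat.div_le_self _ _
  rw [pvCondB, pvPre, hL, PySem.Str.startswith_eq, Bool.eq_iff_iff]
  simp only [decide_eq_true_eq]
  rw [String.ext_iff]
  simp only [PySem.Str.toList_slice, PySem.Chars.slice_eq_listSlice]
  rw [PySem.List.slice_natCast_add, PySem.List.slice_zero_start, PySem.List.slice_to_natCast,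
      PySem.List.slice_from_natCast]
  show _ ↔ PySem.Chars.startswith _ _ = true
  rw [show ∀ (a b : List Char), PySem.Chars.startswith a b = b.isPrefixOf a from fun _ _ => rfl]
  rw [List.isPrefixOf_iff_prefix, List.prefix_iff_eq_take, List.length_take,
      Nat.min_eq_left hmle]
  exact eq_comm

-- partition lemma: a flatMap over distinct keys of the per-key groups of X, each kept or dropped
-- by a predicate on the key, is a permutation of the direct filter of X.
lemma pvPartition {β : Type} (K : List String) (X : List (String × β)) (q : String → Bool)
    (hnd : K.Nodup) (hcov : ∀ x ∈ X, x.1 ∈ K) :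
    (K.flatMap (fun p => if q p then (X.filter (fun x => x.1 == p)).map (fun x => x.2) else [])).Perm
      ((X.filter (fun x => q x.1)).map (fun x => x.2)) := by
  induction K generalizing X with
  | nil =>
    have hX : X = [] := by
      cases X with
      | nil => rfl
      | cons x xs => exact absurd (hcov x (by simp)) (by simp)
    simp [hX]
  | cons p K' ih =>
    have hpK' : p ∉ K' := (List.nodup_cons.mp hnd).1
    have hndK' : K'.Nodup := (List.nodup_cons.mp hnd).2
    set X' := X.filter (fun x => !(x.1 == p)) with hX'
    have hgrp : ∀ p' ∈ K', X.filter (fun x => x.1 == p') = X'.filter (fun x => x.1 == p') := by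
      intro p' hp'
      have hne : p' ≠ p := fun h => hpK' (h ▸ hp')
      rw [hX', List.filter_filter]
      apply List.filter_congr
      intro x _
      by_cases hx : x.1 = p'
      · simp [hx, hne]
      · simp [hx]
    have hcov' : ∀ x ∈ X', x.1 ∈ K' := by
      intro x hx
      have hmem := List.mem_of_mem_filter hx
      have hne : ¬ (x.1 == p) = true := by
        have := List.of_mem_filter hx; simpa using this
      have := hcov x hmem
      simp only [List.mem_cons] at this
      rcases this with h | h
      · exact absurd (by simp [h]) hne
      · exact h
    have hrec := ih X' hndK' hcov'
    have hrec' : (K'.flatMap (fun p' => if q p' then (X.filter (fun x => x.1 == p')).map (fun x => x.2) else [])).Perm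
        ((X'.filter (fun x => q x.1)).map (fun x => x.2)) := by
      have : (K'.flatMap (fun p' => if q p' then (X.filter (fun x => x.1 == p')).map (fun x => x.2) else []))
          = K'.flatMap (fun p' => if q p' then (X'.filter (fun x => x.1 == p')).map (fun x => x.2) else []) := by
        apply List.flatMap_congr
        intro p' hp'
        rw [hgrp p' hp']
      rw [this]; exact hrec
    rw [List.flatMap_cons]
    -- split the right-hand filter at key p
    have hsplit : ((X.filter (fun x => q x.1)).filter (fun x => x.1 == p)
        ++ (X.filter (fun x => q x.1)).filter (fun x => !(x.1 == p))).Perm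
        (X.filter (fun x => q x.1)) := List.filter_append_perm _ _
    have hchunk : (if q p then (X.filter (fun x => x.1 == p)).map (fun x => x.2) else [])
        = ((X.filter (fun x => q x.1)).filter (fun x => x.1 == p)).map (fun x => x.2) := by
      rw [List.filter_filter]
      by_cases hq : q p = true
      · rw [if_pos hq]
        congr 1
        apply List.filter_congr
        intro x _
        by_cases hx : x.1 = p
        · simp [hx, hq]
        · simp [hx]
      · rw [if_neg (by simp [hq])]
        have : (X.filter (fun x => x.1 == p && q x.1)) = [] := by
          apply List.filter_eq_nil_iff.mpr
          intro x _
          by_cases hx : x.1 = p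
          · simp [hx, hq]
          · simp [hx]
        rw [this]; rfl
    have hrest : (X'.filter (fun x => q x.1)) = (X.filter (fun x => q x.1)).filter (fun x => !(x.1 == p)) := by
      rw [hX', List.filter_filter, List.filter_filter]
      apply List.filter_congr
      intro x _
      rw [Bool.and_comm]
    rw [hchunk]
    refine ((hrec'.trans (by rw [hrest])).append_left _).trans ?_
    rw [← List.map_append]
    exact hsplit.map _

-- B's per-position candidate list, sorted, IS the enumerate-order filter.
lemma pvSorted_cand (text : String) (ds : List (String × String)) (i : Int) :
    PySem.List.sorted
      (((PySem.List.enumerate ds).foldl (fun d e =>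
          d.modify (pvPre e.2.2) [] (fun g => g ++ [(e.1, pvFmt e.2.1)])) PySem.Dict.empty).items.foldl
        (fun c pe => if PySem.Str.startswith (PySem.Str.slice text (some i) none) pe.1
                     then c ++ pe.2 else c) [])
      (fun e => e.1)
    = ((PySem.List.enumerate ds).filter (fun e => pvCondB text e.2 i)).map
        (fun e => (e.1, pvFmt e.2.1)) := by
  set q : String → Bool := fun p => PySem.Str.startswith (PySem.Str.slice text (some i) none) p with hq
  -- the dict fold is a fold over pvL ds
  have hfold : ((PySem.List.enumerate ds).foldl (fun d e =>
        d.modify (pvPre e.2.2) [] (fun g => g ++ [(e.1, pvFmt e.2.1)])) PySem.Dict.empty)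
      = (pvL ds).foldl (fun d p => d.modify p.1 [] (fun g => g ++ [p.2])) PySem.Dict.empty := by
    rw [pvL, List.foldl_map]
  set groups := (pvL ds).foldl (fun d p => d.modify p.1 [] (fun g => g ++ [p.2])) PySem.Dict.empty with hgroups
  have hkeys : groups.keys = PySem.Set.ofList ((pvL ds).map (fun x => x.1)) := by
    rw [hgroups, PySem.Dict.keys_foldl_modify_key (pvL ds) (fun x => x.1) [] (fun _ x => fun g => g ++ [x.2])]
    rw [PySem.Dict.keys_empty, PySem.Set.update_nil_left]
  have hndk : groups.keys.Nodup := by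
    rw [hkeys]; exact PySem.Set.nodup_ofList _
  have hgetD : ∀ p, groups.getD p [] = ((pvL ds).filter (fun x => x.1 == p)).map (fun x => x.2) := by
    intro p
    rw [hgroups, PySem.Dict.getD_foldl_modify_append, PySem.Dict.getD_empty]
    simp
  -- the candidate fold is a flatMap over the keys
  have hcand : groups.items.foldl (fun c pe => if q pe.1 then c ++ pe.2 else c) []
      = groups.keys.flatMap (fun p => if q p then ((pvL ds).filter (fun x => x.1 == p)).map (fun x => x.2) else []) := by
    have hbody : (fun (c : List (Int × String)) (pe : String × List (Int × String)) => if q pe.1 then c ++ pe.2 else c)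
        = fun c pe => c ++ (if q pe.1 then pe.2 else []) := by
      funext c pe
      by_cases h : q pe.1 = true <;> simp [h]
    rw [hbody, PySem.List.foldl_append_eq_flatMap, List.nil_append,
        PySem.Dict.items_eq_map_keys groups hndk [], List.flatMap_map]
    apply List.flatMap_congr
    intro p _
    by_cases h : q p = true <;> simp [h, hgetD p]
  have hcov : ∀ x ∈ pvL ds, x.1 ∈ groups.keys := by
    intro x hx
    rw [hkeys, PySem.Set.mem_ofList]
    exact List.mem_map_of_mem hx
  -- the target, as filter-then-map of pvL
  have htgt : ((pvL ds).filter (fun x => q x.1)).map (fun x => x.2)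
      = ((PySem.List.enumerate ds).filter (fun e => pvCondB text e.2 i)).map
          (fun e => (e.1, pvFmt e.2.1)) := by
    rw [pvL, List.filter_map, List.map_map]
    rfl
  have hperm : (((pvL ds).filter (fun x => q x.1)).map (fun x => x.2)).Perm
      (groups.items.foldl (fun c pe => if q pe.1 then c ++ pe.2 else c) []) := by
    rw [hcand]
    exact (pvPartition groups.keys (pvL ds) q hndk hcov).symm
  have hpw : (((pvL ds).filter (fun x => q x.1)).map (fun x => x.2)).Pairwise
      (fun a b => (fun e : Int × String => e.1) a < (fun e : Int × String => e.1) b) := by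
    rw [htgt]
    apply List.Pairwise.map
    · intro a b h
      exact h
    · exact (PySem.List.pairwise_lt_enumerate ds 0).filter _
  rw [hfold]
  rw [PySem.List.sorted_eq_of_perm_of_pairwise_lt _ _ _ hperm hpw]
  exact htgt

-- filtering/mapping through enumerate ignores the indices
lemma pvEnum_filter_map (ds : List (String × String)) (p : String × String → Bool)
    (g : String × String → String) (s : Int) :
    ((PySem.List.enumerate ds s).filter (fun e => p e.2)).map (fun e => g e.2)
      = (ds.filter p).map g := by
  induction ds generalizing s with
  | nil => simp
  | cons kv t ih =>
    rw [PySem.List.enumerate_cons, List.filter_cons, List.filter_cons]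
    by_cases h : p kv = true
    · simp only [h, if_pos, List.map_cons]
      rw [ih (s + 1)]
    · simp only [h]
      simpa using ih (s + 1)

-- ===== VERDICT (by name: the statement is the Claim_ definition above) =====
theorem recover_read_numbers_spec : Claim_equal_recover_read_numbers := by
  intro text ds _ _
  unfold Spec_recover_read_numbers
  rw [pvA_eq]
  unfold recover_read_numbers_alt
  rw [PySem.List.foldl_congr_mem _ _
      (fun out i => out ++ ((PySem.List.enumerate ds).filter (fun e => pvCondB text e.2 i)).map
        (fun e => pvFmt e.2.1)) _
      (by
        intro out i hi
        simp only
        rw [pvSorted_cand text ds i, List.map_map]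
        rfl)]
  rw [PySem.List.foldl_append_eq_flatMap, List.nil_append]
  apply List.flatMap_congr
  intro i hi
  obtain ⟨h0, _⟩ := (PySem.List.mem_pyRange_one).1 hi
  rw [List.filter_congr (fun kv _ => pvCond_agree text kv i h0),
      ← pvEnum_filter_map ds (fun kv => pvCondB text kv i) (fun kv => pvFmt kv.1) 0]
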